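-- pv_equiv track=rewrite | github.com/Yukics/Python-and-trash | AutoVLSM/Subnetting y VLSM.py | Mascara
-- ===== SOURCE A (Python) =====
-- def Mascara(clase, nredes):
--     base_2 = 2
--     potencia = 0
--     mascaracidr_binario = ""
--     nredes = int(nredes)
--     while base_2**potencia <= nredes:
--         potencia += 1
--     mascaracidr = (clase*8) + potencia
--     mascaracidr_binario = mascaracidr_binario + ("1" * mascaracidr) + ("0" * (32-mascaracidr))
--     mascara = str(int(mascaracidr_binario[0:8], 2))+"."+str(int(mascaracidr_binario[8:16], 2))+"."+str(int(mascaracidr_binario[16:24], 2))+"."+str(int(mascaracidr_binario[24:32], 2))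
--     return mascara, mascaracidr
-- ===== SOURCE B (Python) =====
-- def Mascara(clase, nredes):
--     base_2 = 2
--     potencia = 0
--     nredes = int(nredes)
--     while base_2**potencia <= nredes:
--         potencia += 1
--     mascaracidr = clase*8 + potencia
--     octets = []
--     for i in range(4):
--         bits = min(8, max(0, mascaracidr - 8*i))
--         octets.append(256 - 2**(8 - bits))
--     return ".".join(str(o) for o in octets), mascaracidr
-- ===== Notes on version B (the rewrite author's own statement) =====
-- stated objective: faster
-- what changed: B drops A's construction of a '1'*m+'0'*(32-m) bit string and its re-parsing via int(slice,2): it derives each of the four octets directly by clamped arithmetic (bits = min(8,max(0,m-8i)), octet = 256 - 2**(8-bits)), keeping A's power-finding loop.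
import Mathlib
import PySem

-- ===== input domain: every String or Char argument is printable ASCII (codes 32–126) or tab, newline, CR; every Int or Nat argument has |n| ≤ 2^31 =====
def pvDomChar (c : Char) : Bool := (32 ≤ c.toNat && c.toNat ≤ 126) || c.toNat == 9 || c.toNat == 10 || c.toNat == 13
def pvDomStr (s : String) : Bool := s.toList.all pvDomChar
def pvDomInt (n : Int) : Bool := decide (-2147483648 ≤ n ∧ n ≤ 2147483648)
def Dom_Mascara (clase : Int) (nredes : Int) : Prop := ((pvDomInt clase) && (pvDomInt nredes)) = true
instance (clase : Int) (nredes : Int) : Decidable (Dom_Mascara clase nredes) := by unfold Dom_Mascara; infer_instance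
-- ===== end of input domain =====

-- B replaces A's build-a-bit-string-and-reparse-it mask construction by direct per-octet
-- arithmetic (four clamped bit counts), keeping A's power-finding loop; same return value.


-- ===== PORT A =====
-- 'while base_2**potencia <= nredes: potencia += 1' — this loop appears identically in A and in B (B keeps it)
def potenciaLoop (nredes : Int) (p : Nat) : Nat :=
  if (2:Int) ^ p ≤ nredes then potenciaLoop nredes (p + 1) else p
termination_by nredes.toNat + 1 - p
decreasing_by
  rename_i h
  have h1 : p < 2 ^ p := Nat.lt_two_pow_self
  have h2 : ((p : Int)) < nredes := by
    calc (p : Int) < ((2 ^ p : Nat) : Int) := by exact_mod_cast h1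
    _ ≤ nredes := by push_cast at h ⊢; exact_mod_cast h
  omega

def Mascara (clase : Int) (nredes : Int) : String × Int :=
  let potencia : Int := (potenciaLoop nredes 0 : Nat)
  let mascaracidr := clase * 8 + potencia
  -- '"1"*m + "0"*(32-m)': Python string repetition clamps a negative count to 0, exactly Int.toNat
  let binario : List Char :=
    List.replicate mascaracidr.toNat '1' ++ List.replicate (32 - mascaracidr).toNat '0'
  -- int(binario[a:b], 2): the slice is always 8 chars '0'/'1' (binario has ≥ 32 chars), so
  -- int() never raises and the .getD 0 branch is dead
  let o1 := (PySem.Int.ofCharsBase? (PySem.List.slice binario (some 0) (some 8)) 2).getD 0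
  let o2 := (PySem.Int.ofCharsBase? (PySem.List.slice binario (some 8) (some 16)) 2).getD 0
  let o3 := (PySem.Int.ofCharsBase? (PySem.List.slice binario (some 16) (some 24)) 2).getD 0
  let o4 := (PySem.Int.ofCharsBase? (PySem.List.slice binario (some 24) (some 32)) 2).getD 0
  -- str(o1)+"."+str(o2)+"."+str(o3)+"."+str(o4), concatenation done on the char lists
  (String.ofList (PySem.Int.toChars o1 ++ '.' :: PySem.Int.toChars o2 ++ '.' ::
      PySem.Int.toChars o3 ++ '.' :: PySem.Int.toChars o4), mascaracidr)

-- ===== PORT B =====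
def Mascara_alt (clase : Int) (nredes : Int) : String × Int :=
  let potencia : Int := (potenciaLoop nredes 0 : Nat)
  let mascaracidr := clase * 8 + potencia
  -- for i in range(4): bits = min(8, max(0, m - 8*i)); octets.append(256 - 2**(8-bits))
  -- (the exponent 8-bits lies in 0..8, so the Nat exponent via .toNat is exact)
  let octets : List Int := (PySem.List.pyRange 0 4 1).map
    (fun i => 256 - 2 ^ (8 - min 8 (max 0 (mascaracidr - 8 * i))).toNat)
  (PySem.Str.join "." (octets.map PySem.Int.toStr), mascaracidr)

-- ===== PRECONDITION & SPEC =====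
def Spec_Mascara (clase : Int) (nredes : Int) (out : String × Int) : Prop := out = Mascara_alt clase nredes
instance (clase : Int) (nredes : Int) (out : String × Int) : Decidable (Spec_Mascara clase nredes out) := by unfold Spec_Mascara; infer_instance

-- ===== CLAIM (what is proved, stated in full; the proofs are below) =====
def Claim_equal_Mascara : Prop := ∀ (clase : Int) (nredes : Int), Dom_Mascara clase nredes → Spec_Mascara clase nredes (Mascara clase nredes)

-- ===== LEMMAS AND PROOFS =====

-- the bit string A builds and the octet A parses out of its [a:b] slice, as functions of mascaracidr
def pvBin (m : Int) : List Char :=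
  List.replicate m.toNat '1' ++ List.replicate (32 - m).toNat '0'
def pvOct (m : Int) (a b : Int) : Int :=
  (PySem.Int.ofCharsBase? (PySem.List.slice (pvBin m) (some a) (some b)) 2).getD 0
-- the char list A's mask computes
def pvMaskA (m : Int) : List Char :=
  PySem.Int.toChars (pvOct m 0 8) ++ '.' :: PySem.Int.toChars (pvOct m 8 16) ++ '.' ::
    PySem.Int.toChars (pvOct m 16 24) ++ '.' :: PySem.Int.toChars (pvOct m 24 32)
-- the char list B's mask computes
def pvMaskB (m : Int) : List Char :=
  PySem.Chars.join ['.'] (((PySem.List.pyRange 0 4 1).map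
    (fun i => 256 - 2 ^ (8 - min 8 (max 0 (m - 8 * i))).toNat)).map PySem.Int.toChars)

-- m > 32: every slice of the all-ones string is "11111111", i.e. 255
lemma pvOct_hi (m a b : Int) (ha : 0 ≤ a) (hb : a + 8 = b) (hble : b ≤ 32) (h : 32 < m) :
    pvOct m a b = 255 := by
  unfold pvOct pvBin
  have h32 : (32 - m).toNat = 0 := by omega
  rw [h32, PySem.List.slice_toNat _ ha (by omega)]
  simp only [List.replicate_zero, List.append_nil, List.drop_replicate, List.take_replicate]
  have : min (b.toNat - a.toNat) (m.toNat - a.toNat) = 8 := by omega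
  rw [this]
  decide

-- m < 0: every slice of the all-zeros string is "00000000", i.e. 0
lemma pvOct_lo (m a b : Int) (ha : 0 ≤ a) (hb : a + 8 = b) (hble : b ≤ 32) (h : m < 0) :
    pvOct m a b = 0 := by
  unfold pvOct pvBin
  have h0 : m.toNat = 0 := by omega
  rw [h0, PySem.List.slice_toNat _ ha (by omega)]
  simp only [List.replicate_zero, List.nil_append, List.drop_replicate, List.take_replicate]
  have : min (b.toNat - a.toNat) ((32 - m).toNat - a.toNat) = 8 := by omega
  rw [this]
  decide

lemma pvMask_eq (m : Int) : pvMaskA m = pvMaskB m := by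
  have hr : PySem.List.pyRange 0 4 1 = [0,1,2,3] := by decide
  rcases lt_trichotomy m 0 with h | h | h
  · unfold pvMaskA pvMaskB
    rw [hr, pvOct_lo m 0 8 (by norm_num) (by norm_num) (by norm_num) h,
        pvOct_lo m 8 16 (by norm_num) (by norm_num) (by norm_num) h,
        pvOct_lo m 16 24 (by norm_num) (by norm_num) (by norm_num) h,
        pvOct_lo m 24 32 (by norm_num) (by norm_num) (by norm_num) h]
    have e : ∀ a : Int, 0 ≤ a → (8 - min 8 (max 0 (m - a))).toNat = 8 := by
      intro a h1; omega
    simp only [List.map]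
    rw [show m - 8*0 = m - 0 by ring, show m - 8*1 = m - 8 by ring,
        show m - 8*2 = m - 16 by ring, show m - 8*3 = m - 24 by ring,
        e 0 (by norm_num), e 8 (by norm_num), e 16 (by norm_num), e 24 (by norm_num)]
    decide
  · subst h; decide
  · rcases le_or_gt m 32 with h32 | h32
    · -- 1 ≤ m ≤ 32: finitely many masks, check each
      have h1 : 1 ≤ m := h
      interval_cases m <;> decide
    · unfold pvMaskA pvMaskB
      rw [hr, pvOct_hi m 0 8 (by norm_num) (by norm_num) (by norm_num) h32,
          pvOct_hi m 8 16 (by norm_num) (by norm_num) (by norm_num) h32,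
          pvOct_hi m 16 24 (by norm_num) (by norm_num) (by norm_num) h32,
          pvOct_hi m 24 32 (by norm_num) (by norm_num) (by norm_num) h32]
      have e : ∀ a : Int, 0 ≤ a → a ≤ 24 → (8 - min 8 (max 0 (m - a))).toNat = 0 := by
        intro a h1 h2; omega
      simp only [List.map]
      rw [show m - 8*0 = m - 0 by ring, show m - 8*1 = m - 8 by ring,
          show m - 8*2 = m - 16 by ring, show m - 8*3 = m - 24 by ring,
          e 0 (by norm_num) (by norm_num), e 8 (by norm_num) (by norm_num),
          e 16 (by norm_num) (by norm_num), e 24 (by norm_num) (by norm_num)]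
      decide

lemma Mascara_eq_mask (c n : Int) :
    Mascara c n = (String.ofList (pvMaskA (c * 8 + (potenciaLoop n 0 : Nat))),
      c * 8 + (potenciaLoop n 0 : Nat)) := rfl

lemma Mascara_alt_eq_mask (c n : Int) :
    Mascara_alt c n = (String.ofList (pvMaskB (c * 8 + (potenciaLoop n 0 : Nat))),
      c * 8 + (potenciaLoop n 0 : Nat)) := by
  unfold Mascara_alt pvMaskB
  refine Prod.ext ?_ rfl
  show PySem.Str.join "." _ = _
  conv_lhs => rw [← String.ofList_toList (s := PySem.Str.join "." _)]
  rw [PySem.Str.toList_join]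
  simp [List.map_map, Function.comp_def, PySem.Int.toList_toStr]

-- ===== VERDICT (by name: the statement is the Claim_ definition above) =====
theorem Mascara_spec : Claim_equal_Mascara := by
  intro clase nredes _
  unfold Spec_Mascara
  rw [Mascara_eq_mask, Mascara_alt_eq_mask, pvMask_eq]
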